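-- pv_equiv track=rewrite | github.com/sweetkco/NIA2020PhotoWakeUpService | photowakeup_ui/verge3d_blender/manager/server.py | sortHTMLs
-- ===== SOURCE A (Python) =====
-- def sortHTMLs(files):
--     """index files come first"""
--
--     indices = []
--     other = []
--
--     for f in files:
--         if 'index.htm' in f:
--             indices.append(f)
--         else:
--             other.append(f)
--
--     return indices + other
-- ===== SOURCE B (Python) =====
-- def sortHTMLs(files):
--     """index files come first"""
--     return sorted(files, key=lambda f: 'index.htm' not in f)
-- ===== Notes on version B (the rewrite author's own statement) =====
-- stated objective: idiomatic
-- what changed: Replaces the two-bucket partition loop with a single stable sort keyed on 'index.htm' not in f, delegating the ordering (index files first, original order within each group) to sorted's stability.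
import Mathlib
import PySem

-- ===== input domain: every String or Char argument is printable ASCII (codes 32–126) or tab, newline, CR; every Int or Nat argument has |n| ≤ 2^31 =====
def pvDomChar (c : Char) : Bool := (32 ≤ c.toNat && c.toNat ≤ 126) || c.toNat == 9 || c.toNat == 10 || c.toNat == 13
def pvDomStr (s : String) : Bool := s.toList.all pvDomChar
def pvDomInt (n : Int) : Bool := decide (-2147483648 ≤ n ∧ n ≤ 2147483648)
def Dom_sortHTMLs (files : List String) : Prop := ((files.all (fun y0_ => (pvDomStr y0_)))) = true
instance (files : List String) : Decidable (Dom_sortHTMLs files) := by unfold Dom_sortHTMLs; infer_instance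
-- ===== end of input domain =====

-- B replaces A's two-bucket partition loop by one stable sort keyed on substring membership (more idiomatic, same result).


-- ===== PORT A =====
-- for f in files: append to 'indices' if 'index.htm' in f else to 'other'; return indices + other
def sortHTMLs (files : List String) : List String :=
  let p := files.foldl
    (fun (acc : List String × List String) f =>
      if PySem.Str.isIn "index.htm" f then (acc.1 ++ [f], acc.2) else (acc.1, acc.2 ++ [f]))
    ([], [])
  p.1 ++ p.2

-- ===== PORT B =====
-- return sorted(files, key=lambda f: 'index.htm' not in f)
def sortHTMLs_alt (files : List String) : List String :=
  PySem.List.sorted files (fun f => !(PySem.Str.isIn "index.htm" f))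

-- ===== PRECONDITION & SPEC =====
def Spec_sortHTMLs (files : List String) (out : List String) : Prop := out = sortHTMLs_alt files
instance (files : List String) (out : List String) : Decidable (Spec_sortHTMLs files out) := by unfold Spec_sortHTMLs; infer_instance

-- ===== CLAIM (what is proved, stated in full; the proofs are below) =====
def Claim_equal_sortHTMLs : Prop := ∀ (files : List String), Dom_sortHTMLs files → Spec_sortHTMLs files (sortHTMLs files)

-- ===== LEMMAS AND PROOFS =====

-- the sort key of B
def pvKey (f : String) : Bool := !(PySem.Str.isIn "index.htm" f)

-- inserting a low-key (index) element lands right after the low block, before the high block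
lemma insertBy_low (x : String) (hx : pvKey x = false) (I O : List String)
    (hI : ∀ y ∈ I, pvKey y = false) (hO : ∀ y ∈ O, pvKey y = true) :
    PySem.List.insertBy (fun a b => decide (pvKey a < pvKey b)) x (I ++ O) = I ++ x :: O := by
  induction I with
  | nil =>
    cases O with
    | nil => rfl
    | cons o os =>
      have ho : pvKey o = true := hO o (by simp)
      simp [PySem.List.insertBy, hx, ho]
  | cons i is ih =>
    have hi : pvKey i = false := hI i (by simp)
    simp only [List.cons_append, PySem.List.insertBy, hx, hi]
    rw [ih (fun y hy => hI y (List.mem_cons_of_mem _ hy))]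
    simp

-- inserting a high-key (non-index) element appends at the end
lemma insertBy_high (x : String) (hx : pvKey x = true) (ys : List String) :
    PySem.List.insertBy (fun a b => decide (pvKey a < pvKey b)) x ys = ys ++ [x] := by
  apply PySem.List.insertBy_of_forall_not_before
  intro y _
  simp [hx, Bool.lt_iff]

-- the insertion-sort fold keeps the two blocks: low block then high block, each in input order
lemma sorted_fold_partition (xs : List String) (I O : List String)
    (hI : ∀ y ∈ I, pvKey y = false) (hO : ∀ y ∈ O, pvKey y = true) :
    xs.foldl (fun acc x => PySem.List.insertBy (fun a b => decide (pvKey a < pvKey b)) x acc) (I ++ O)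
      = (I ++ xs.filter (fun f => !pvKey f)) ++ (O ++ xs.filter (fun f => pvKey f)) := by
  induction xs generalizing I O with
  | nil => simp
  | cons x xs ih =>
    cases hx : pvKey x with
    | false =>
      have hI' : ∀ y ∈ I ++ [x], pvKey y = false := by
        intro y hy
        rcases List.mem_append.1 hy with h | h
        · exact hI y h
        · simp at h; subst h; exact hx
      simp only [List.foldl_cons]
      rw [insertBy_low x hx I O hI hO,
          show I ++ x :: O = (I ++ [x]) ++ O by simp,
          ih (I ++ [x]) O hI' hO]
      simp [hx]
    | true =>
      have hO' : ∀ y ∈ O ++ [x], pvKey y = true := by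
        intro y hy
        rcases List.mem_append.1 hy with h | h
        · exact hO y h
        · simp at h; subst h; exact hx
      simp only [List.foldl_cons]
      rw [insertBy_high x hx (I ++ O),
          show (I ++ O) ++ [x] = I ++ (O ++ [x]) by simp,
          ih I (O ++ [x]) hI hO']
      simp [hx]

-- A's fold keeps the two buckets: each is the corresponding filter in input order
lemma foldA_partition (xs : List String) (I O : List String) :
    xs.foldl
      (fun (acc : List String × List String) f =>
        if PySem.Str.isIn "index.htm" f then (acc.1 ++ [f], acc.2) else (acc.1, acc.2 ++ [f]))
      (I, O)
      = (I ++ xs.filter (fun f => PySem.Str.isIn "index.htm" f),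
         O ++ xs.filter (fun f => !(PySem.Str.isIn "index.htm" f))) := by
  induction xs generalizing I O with
  | nil => simp
  | cons x xs ih =>
    cases hx : PySem.Str.isIn "index.htm" x with
    | true =>
      simp only [List.foldl_cons, ih, List.filter_cons, hx]
      simp
    | false =>
      simp only [List.foldl_cons, hx, Bool.false_eq_true, if_false, ih, List.filter_cons]
      simp

-- ===== VERDICT (by name: the statement is the Claim_ definition above) =====
theorem sortHTMLs_spec : Claim_equal_sortHTMLs := by
  intro files _
  show sortHTMLs files = sortHTMLs_alt files
  unfold sortHTMLs sortHTMLs_alt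
  rw [PySem.List.sorted_eq_foldl_insertBy]
  have hB := sorted_fold_partition files [] [] (by simp) (by simp)
  simp only [List.nil_append] at hB
  have hA := foldA_partition files [] []
  simp only [List.nil_append] at hA
  simp only [hA]
  rw [show (fun acc x => PySem.List.insertBy
        (fun a b => decide ((!PySem.Str.isIn "index.htm" a) < (!PySem.Str.isIn "index.htm" b))) x acc)
      = (fun acc x => PySem.List.insertBy (fun a b => decide (pvKey a < pvKey b)) x acc) from rfl,
     hB]
  simp [pvKey]
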